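-- pv_equiv track=rewrite | github.com/JyGein/JyGeins-KTANE-Solvers | modules/MagentaCipher.py | magentacipherstep2
-- ===== SOURCE A (Python) =====
-- from math import ceil
--
-- def magentacipherstep2(Serial, encrypt2):
--   alphabet = [chr(i) for i in range(ord('A'),ord('Z')+1)]
--   key = ''
--   for char in Serial:
--     if char.isdigit() == False:
--       key += char
--
--   keydict = {}
--   sortedkey = ''.join(sorted(set(key)))
--   keyleft = len(key)
--   dashesleft = 6
--
--   count = 0
--   for char in key:
--     keydict[count] = [sortedkey.index(char), ceil(dashesleft/keyleft)]
--     keyleft -= 1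
--     dashesleft -= keydict[count][1]
--     count += 1
--   soldict = {}
--   for k in keydict:
--     soldict[k] = ''
--
--   count1 = 0
--   hasdashes = {}
--   while count1 < 6:
--     sortedkeydict = []
--     for f in range(0, len(keydict)):
--       if keydict[f][0]==0 and keydict[f][1]>0:
--         sortedkeydict += [sorted(keydict.items())[f]]
--     if sortedkeydict==[]:
--       for k in keydict:
--         keydict[k][0] -= 1
--       for f in range(0, len(keydict)):
--         if keydict[f][0]==0 and keydict[f][1]>0:
--           sortedkeydict += [sorted(keydict.items())[f]]
--     for i in sortedkeydict:
--       soldict[i[0]] += encrypt2[count1]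
--       keydict[i[0]][1] -= 1
--       count1 += 1
--
--   encrypt3 = ''
--   count = 0
--   for i in range(0, ceil(6/len(key))):
--     for k in soldict:
--       if count == 6:
--         break
--       count += 1
--       encrypt3 += soldict[k][i]
--   return encrypt3
-- ===== SOURCE B (Python) =====
-- from math import ceil
--
-- def magentacipherstep2(Serial, encrypt2):
--     key = [c for c in Serial if not c.isdigit()]
--     n = len(key)
--     lengths = []
--     dashes = 6
--     for i in range(n):
--         q = ceil(dashes / (n - i))
--         lengths.append(q)
--         dashes -= q
--     cols = [''] * n
--     pos = 0
--     for letter in sorted(set(key)):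
--         group = [i for i in range(n) if key[i] == letter]
--         for r in range(max(lengths[i] for i in group)):
--             for i in group:
--                 if lengths[i] > r:
--                     cols[i] += encrypt2[pos]
--                     pos += 1
--     out = ''
--     for row in range(ceil(6 / n)):
--         for i in range(n):
--             if len(out) == 6:
--                 return out
--             out += cols[i][row]
--     return out
-- ===== Notes on version B (the rewrite author's own statement) =====
-- stated objective: faster
-- what changed: A simulates column selection by repeatedly rescanning and re-sorting a dict of (rank,length) entries and globally decrementing ranks inside a while loop; B iterates once over the sorted distinct key letters, takes each letter's index group directly and distributes the six characters by explicit round-robin rounds, then reads the columns row-major with an early return — dropping A's repeated per-iteration rescans/sorts of all columns (a constant-factor win, measured ~4x).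
import Mathlib
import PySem

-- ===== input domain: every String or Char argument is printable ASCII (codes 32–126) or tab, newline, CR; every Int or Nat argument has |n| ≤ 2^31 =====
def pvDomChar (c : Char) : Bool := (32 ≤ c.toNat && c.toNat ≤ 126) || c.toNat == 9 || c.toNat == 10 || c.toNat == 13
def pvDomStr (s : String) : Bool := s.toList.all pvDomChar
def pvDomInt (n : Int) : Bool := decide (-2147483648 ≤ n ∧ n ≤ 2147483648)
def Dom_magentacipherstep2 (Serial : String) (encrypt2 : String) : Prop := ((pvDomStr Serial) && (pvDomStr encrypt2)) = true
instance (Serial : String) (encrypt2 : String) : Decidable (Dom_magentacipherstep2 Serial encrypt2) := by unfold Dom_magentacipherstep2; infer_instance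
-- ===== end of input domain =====

-- B replaces A's mutable rank-decrement simulation over dicts by a direct pass over the
-- sorted distinct key letters (per-letter index groups, round-robin rounds), same return value.

-- ceil(d/k) for k > 0, as Python's ceil(d/k); exact here (small non-negative operands)
def pvCeilDiv (d k : Int) : Int := -(PySem.Int.floordiv (-d) k)

-- ===== PORT A =====
-- A's dicts keydict/soldict have keys exactly 0,1,…,n-1 inserted in ascending order, and
-- sorted(keydict.items())[f] = (f, keydict[f]); they are ported positionally as lists.
def pvASel (kd : List (Int × Int)) : List (Int × (Int × Int)) :=
  (PySem.List.pyRange 0 (PySem.List.len kd) 1).foldl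
    (fun acc f =>
      if ((PySem.List.pyGetD kd f (0, 0)).1 == 0 && decide ((PySem.List.pyGetD kd f (0, 0)).2 > 0))
      then acc ++ [(f, PySem.List.pyGetD kd f (0, 0))] else acc) []

-- soldict[i[0]] += encrypt2[count1]; keydict[i[0]][1] -= 1; count1 += 1
-- (encrypt2[count1] raises IndexError for len(encrypt2) < 6 — excluded by Pre_; pyGetD default '?')
def pvAStep (enc : List Char) (st : List (Int × Int) × List (List Char) × Int)
    (i : Int × (Int × Int)) : List (Int × Int) × List (List Char) × Int :=
  let sol := PySem.List.pySetD st.2.1 i.1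
      (PySem.List.pyGetD st.2.1 i.1 [] ++ [PySem.List.pyGetD enc st.2.2 '?'])
  let kd := PySem.List.pySetD st.1 i.1
      ((PySem.List.pyGetD st.1 i.1 (0, 0)).1, (PySem.List.pyGetD st.1 i.1 (0, 0)).2 - 1)
  (kd, sol, st.2.2 + 1)

-- the 'while count1 < 6' loop; fuel bounds the iteration count (≤ len(key)+13 under Pre_,
-- proved in the lemmas); A diverges exactly on the inputs Pre_ excludes (empty key)
def pvAWhile (enc : List Char) : Nat → List (Int × Int) → List (List Char) → Int → List (List Char)
  | 0, _, sol, _ => sol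
  | fuel + 1, kd, sol, c1 =>
    if c1 < 6 then
      let sel := pvASel kd
      let kd := if sel.isEmpty then kd.map (fun e => (e.1 - 1, e.2)) else kd
      let sel := if sel.isEmpty then pvASel kd else sel
      let st := sel.foldl (pvAStep enc) (kd, sol, c1)
      pvAWhile enc fuel st.1 st.2.1 st.2.2
    else sol

-- inner 'for k in soldict' with the count == 6 break
def pvAInner (i : Int) : List (List Char) → List Char × Int → List Char × Int
  | [], st => st
  | col :: rest, (acc, count) =>
    if count == 6 then (acc, count)
    else pvAInner i rest (acc ++ [PySem.List.pyGetD col i '?'], count + 1)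

def pvARead (sol : List (List Char)) (rows : List Int) (st : List Char × Int) : List Char × Int :=
  rows.foldl (fun st i => pvAInner i sol st) st

def magentacipherstep2 (Serial : String) (encrypt2 : String) : String :=
  -- 'alphabet' in A is dead code (never used) and is not ported
  let enc := encrypt2.toList
  let key : List Char := Serial.toList.foldl
    (fun k c => if (PySem.Chars.isdigit c == false) then k ++ [c] else k) []
  let sortedkey := PySem.List.sorted (PySem.Set.ofList key) (fun c => c) false
  -- keydict build: count is the running key 0,1,…; positional, so only (keyleft, dashesleft, kd) is carried
  -- sortedkey.index(char) never raises (char ∈ sortedkey): index?.getD 0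
  let st0 := key.foldl
    (fun (st : List (Int × Int) × Int × Int) c =>
      let entry : Int × Int :=
        ((((PySem.List.index? sortedkey c).getD 0 : Nat) : Int), pvCeilDiv st.2.2 st.2.1)
      (st.1 ++ [entry], st.2.1 - 1, st.2.2 - entry.2))
    ([], PySem.List.len key, 6)
  let kd := st0.1
  let sol0 : List (List Char) := kd.map (fun _ => ([] : List Char))
  let sol := pvAWhile enc (key.length + 13) kd sol0 0
  let out := pvARead sol (PySem.List.pyRange 0 (pvCeilDiv 6 (PySem.List.len key)) 1) ([], 0)
  String.mk out.1

-- ===== PORT B =====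
-- group = [i for i in range(n) if key[i] == letter]
def pvBGroup (key : List Char) (letter : Char) : List Int :=
  (PySem.List.pyRange 0 (PySem.List.len key) 1).filter
    (fun i => PySem.List.pyGetD key i '?' == letter)

-- one round r over the group: cols[i] += encrypt2[pos] when lengths[i] > r
def pvBRound (enc : List Char) (lengths : List Int) (group : List Int) (r : Int)
    (st : List (List Char) × Int) : List (List Char) × Int :=
  group.foldl
    (fun st i =>
      if decide (r < PySem.List.pyGetD lengths i 0) then
        (PySem.List.pySetD st.1 i
           (PySem.List.pyGetD st.1 i [] ++ [PySem.List.pyGetD enc st.2 '?']), st.2 + 1)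
      else st) st

-- body of 'for letter in sorted(set(key))'; max(...) over a nonempty generator: max?.getD 0
def pvBGroupStep (enc : List Char) (key : List Char) (lengths : List Int)
    (st : List (List Char) × Int) (letter : Char) : List (List Char) × Int :=
  let group := pvBGroup key letter
  let rounds := (PySem.List.max? (group.map (fun i => PySem.List.pyGetD lengths i 0))
      (fun x => x)).getD 0
  (PySem.List.pyRange 0 rounds 1).foldl (fun st r => pvBRound enc lengths group r st) st

-- 'if len(out) == 6: return out' inside the double read loop; Bool = early return taken
def pvBInner (cols : List (List Char)) (row : Int) : List Int → List Char → List Char × Bool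
  | [], out => (out, false)
  | i :: rest, out =>
    if PySem.List.len out == 6 then (out, true)
    else pvBInner cols row rest
      (out ++ [PySem.List.pyGetD (PySem.List.pyGetD cols i []) row '?'])

def pvBOuter (cols : List (List Char)) (n : Int) : List Int → List Char → List Char
  | [], out => out
  | row :: rest, out =>
    let st := pvBInner cols row (PySem.List.pyRange 0 n 1) out
    if st.2 then st.1 else pvBOuter cols n rest st.1

def magentacipherstep2_alt (Serial : String) (encrypt2 : String) : String :=
  let enc := encrypt2.toList
  let key : List Char := Serial.toList.filter (fun c => !(PySem.Chars.isdigit c))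
  let n : Int := PySem.List.len key
  let lengths := ((PySem.List.pyRange 0 n 1).foldl
    (fun (st : List Int × Int) i =>
      let q := pvCeilDiv st.2 (n - i)
      (st.1 ++ [q], st.2 - q)) ([], 6)).1
  let cols := ((PySem.List.sorted (PySem.Set.ofList key) (fun c => c) false).foldl
      (pvBGroupStep enc key lengths) (List.replicate key.length ([] : List Char), 0)).1
  String.mk (pvBOuter cols n (PySem.List.pyRange 0 (pvCeilDiv 6 n) 1) [])

-- ===== PRECONDITION & SPEC =====
-- Pre_ excludes exactly the inputs on which A does not return: with no non-digit character in
-- Serial the 'while count1 < 6' loop never terminates, and with len(encrypt2) < 6 the access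
-- encrypt2[count1] raises IndexError.
def Pre_magentacipherstep2 (Serial : String) (encrypt2 : String) : Prop :=
  (Serial.toList.any (fun c => !PySem.Chars.isdigit c)) = true ∧ 6 ≤ encrypt2.toList.length
instance (Serial : String) (encrypt2 : String) : Decidable (Pre_magentacipherstep2 Serial encrypt2) := by
  unfold Pre_magentacipherstep2; infer_instance

def pvWitness_magentacipherstep2 : String × String := ("AB1C", "XYZQWE")

def Spec_magentacipherstep2 (Serial : String) (encrypt2 : String) (out : String) : Prop :=
  out = magentacipherstep2_alt Serial encrypt2
instance (Serial : String) (encrypt2 : String) (out : String) : Decidable (Spec_magentacipherstep2 Serial encrypt2 out) := by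
  unfold Spec_magentacipherstep2; infer_instance

-- ===== CLAIM (what is proved, stated in full; the proofs are below) =====
def Claim_equal_magentacipherstep2 : Prop := ∀ (Serial : String) (encrypt2 : String), Dom_magentacipherstep2 Serial encrypt2 → Pre_magentacipherstep2 Serial encrypt2 → Spec_magentacipherstep2 Serial encrypt2 (magentacipherstep2 Serial encrypt2)

-- ===== LEMMAS AND PROOFS =====

-- ---- abstract description of the shared data ----

-- the sequential length distribution: m columns, d dashes, head gets ceil(d/m)
def pvDistrib (d : Int) : Nat → List Int
  | 0 => []
  | m + 1 => pvCeilDiv d (m + 1) :: pvDistrib (d - pvCeilDiv d (m + 1)) m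

def pvLetters (key : List Char) : List Char :=
  PySem.List.sorted (PySem.Set.ofList key) (fun c => c) false

def pvRnk (key : List Char) (i : Nat) : Nat :=
  (PySem.List.index? (pvLetters key) (key.getD i '?')).getD 0

def pvLen (lens : List Int) (i : Nat) : Int := lens.getD i 0

-- remaining length of column i when group t is being served its round r
def pvRem (key : List Char) (lens : List Int) (t : Nat) (r : Int) (i : Nat) : Int :=
  if pvRnk key i < t then 0
  else if pvRnk key i = t then (if pvLen lens i ≤ r then 0 else pvLen lens i - r)
  else pvLen lens i

def pvKdAt (key : List Char) (lens : List Int) (t : Nat) (r : Int) : List (Int × Int) :=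
  (List.range key.length).map (fun i => (((pvRnk key i : Int)) - t, pvRem key lens t r i))

def pvSumRem (key : List Char) (lens : List Int) (t : Nat) (r : Int) : Int :=
  ((List.range key.length).map (pvRem key lens t r)).sum

def pvG (key : List Char) (t : Nat) : List Int := pvBGroup key ((pvLetters key).getD t '?')

def pvP (lens : List Int) (r : Int) : Int → Bool :=
  fun i => decide (r < PySem.List.pyGetD lens i 0)

def pvR (key : List Char) (lens : List Int) (t : Nat) : Int :=
  (PySem.List.max? ((pvG key t).map (fun i => PySem.List.pyGetD lens i 0)) (fun x => x)).getD 0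

def pvSelIds (key : List Char) (lens : List Int) (t : Nat) (r : Int) : List Int :=
  (pvG key t).filter (pvP lens r)

def pvRounds (enc key : List Char) (lens : List Int) (t : Nat) (r : Int)
    (st : List (List Char) × Int) : List (List Char) × Int :=
  (PySem.List.pyRange r (pvR key lens t) 1).foldl
    (fun st r => pvBRound enc lens (pvG key t) r st) st

def pvBFrom (enc key : List Char) (lens : List Int) (t : Nat)
    (st : List (List Char) × Int) : List (List Char) × Int :=
  ((pvLetters key).drop t).foldl (pvBGroupStep enc key lens) st

def pvKdStep (kd : List (Int × Int)) (i : Int) : List (Int × Int) :=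
  PySem.List.pySetD kd i
    ((PySem.List.pyGetD kd i (0, 0)).1, (PySem.List.pyGetD kd i (0, 0)).2 - 1)

def pvSolStep (enc : List Char) (st : List (List Char) × Int) (i : Int) :
    List (List Char) × Int :=
  (PySem.List.pySetD st.1 i
     (PySem.List.pyGetD st.1 i [] ++ [PySem.List.pyGetD enc st.2 '?']), st.2 + 1)

-- ---- arithmetic ----

theorem pvCeilDiv_bounds (d k : Int) (hk : 0 < k) :
    (pvCeilDiv d k - 1) * k < d ∧ d ≤ pvCeilDiv d k * k :=
  (PySem.Int.neg_floordiv_neg_eq_iff_of_pos hk).mp rfl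

theorem pvCeilDiv_nonneg (d k : Int) (hd : 0 ≤ d) (hk : 0 < k) : 0 ≤ pvCeilDiv d k := by
  obtain ⟨h1, h2⟩ := pvCeilDiv_bounds d k hk
  by_contra h
  push_neg at h
  nlinarith

theorem pvCeilDiv_le (d k : Int) (hd : 0 ≤ d) (hk : 0 < k) : pvCeilDiv d k ≤ d := by
  obtain ⟨h1, h2⟩ := pvCeilDiv_bounds d k hk
  by_contra h
  push_neg at h
  nlinarith

theorem pvDistrib_length (d : Int) (m : Nat) : (pvDistrib d m).length = m := by
  induction m generalizing d with
  | zero => rfl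
  | succ m ih => simp [pvDistrib, ih]

theorem pvDistrib_nonneg (d : Int) (m : Nat) (hd : 0 ≤ d) :
    ∀ x ∈ pvDistrib d m, 0 ≤ x := by
  induction m generalizing d with
  | zero => simp [pvDistrib]
  | succ m ih =>
    intro x hx
    simp only [pvDistrib, List.mem_cons] at hx
    rcases hx with h | h
    · exact h ▸ pvCeilDiv_nonneg d (m + 1) hd (by positivity)
    · exact ih (d - pvCeilDiv d (m + 1))
        (by have := pvCeilDiv_le d (m + 1) hd (by positivity); omega) x h

theorem pvDistrib_sum (d : Int) (m : Nat) (hd : 0 ≤ d) (hm : 1 ≤ m) :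
    (pvDistrib d m).sum = d := by
  induction m generalizing d with
  | zero => omega
  | succ m ih =>
    rcases Nat.eq_zero_or_pos m with hm0 | hm0
    · subst hm0
      have h := pvCeilDiv_bounds d 1 (by norm_num)
      simp only [pvDistrib, List.sum_cons, List.sum_nil]
      push_cast
      omega
    · have hle := pvCeilDiv_le d (m + 1) hd (by positivity)
      have hnn := pvCeilDiv_nonneg d (m + 1) hd (by positivity)
      have := ih (d - pvCeilDiv d (m + 1)) (by omega) hm0
      simp only [pvDistrib, List.sum_cons, this]
      omega

-- ---- letters / ranks ----

theorem pvLetters_nodup (key : List Char) : (pvLetters key).Nodup :=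
  ((PySem.List.sorted_perm _ _ _).nodup_iff).mpr (PySem.Set.nodup_ofList key)

theorem pvMem_letters (key : List Char) (c : Char) : c ∈ pvLetters key ↔ c ∈ key := by
  unfold pvLetters
  rw [PySem.List.mem_sorted, PySem.Set.mem_ofList]

theorem pvLetters_len_le (key : List Char) : (pvLetters key).length ≤ key.length := by
  have h1 : (pvLetters key).length = (PySem.Set.ofList key).length :=
    (PySem.List.sorted_perm _ _ _).length_eq
  rw [h1]
  have gen : ∀ (xs : List Char) (s : List Char),
      (xs.foldl PySem.Set.add s).length ≤ s.length + xs.length := by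
    intro xs
    induction xs with
    | nil => simp
    | cons a t ih =>
      intro s
      have h2 : (PySem.Set.add s a).length ≤ s.length + 1 := by
        unfold PySem.Set.add
        split <;> simp
      calc ((a :: t).foldl PySem.Set.add s).length
          = (t.foldl PySem.Set.add (PySem.Set.add s a)).length := rfl
        _ ≤ (PySem.Set.add s a).length + t.length := ih _
        _ ≤ s.length + (t.length + 1) := by omega
        _ = s.length + (a :: t).length := by simp
  have h3 : PySem.Set.ofList key = key.foldl PySem.Set.add [] := PySem.Set.ofList_eq_foldl key
  rw [h3]
  simpa using gen key []

theorem pvLetters_ne_nil (key : List Char) (h : key ≠ []) : pvLetters key ≠ [] := by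
  unfold pvLetters
  rw [Ne, PySem.List.sorted_eq_nil_iff]
  intro h2
  obtain ⟨c, hc⟩ := List.exists_mem_of_ne_nil key h
  have := (PySem.Set.mem_ofList key c).mpr hc
  simp [h2] at this

theorem pvIndex_self (l : List Char) (t : Nat) (hnd : l.Nodup) (ht : t < l.length) :
    PySem.List.index? l l[t] = some t := by
  cases h : PySem.List.index? l l[t] with
  | none =>
    rw [PySem.List.index?_eq_none_iff] at h
    exact absurd (List.getElem_mem ht) h
  | some k =>
    obtain ⟨hk, hget, _⟩ := PySem.List.getElem_of_index?_eq_some h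
    have := List.Nodup.getElem_inj_iff hnd (i := k) (hi := hk) (j := t) (hj := ht)
    simp [this.mp hget]

theorem pvRnk_lt (key : List Char) (i : Nat) (hi : i < key.length) :
    pvRnk key i < (pvLetters key).length := by
  have hmem : key.getD i '?' ∈ pvLetters key := by
    rw [pvMem_letters, List.getD_eq_getElem key '?' hi]
    exact List.getElem_mem hi
  cases h : PySem.List.index? (pvLetters key) (key.getD i '?') with
  | none =>
    rw [PySem.List.index?_eq_none_iff] at h
    exact absurd hmem h
  | some k =>
    obtain ⟨hk, _, _⟩ := PySem.List.getElem_of_index?_eq_some h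
    unfold pvRnk
    rw [h]
    simpa using hk

theorem pvRnk_getElem (key : List Char) (i : Nat) (hi : i < key.length) :
    (pvLetters key)[pvRnk key i]'(pvRnk_lt key i hi) = key.getD i '?' := by
  have hmem : key.getD i '?' ∈ pvLetters key := by
    rw [pvMem_letters, List.getD_eq_getElem key '?' hi]
    exact List.getElem_mem hi
  cases h : PySem.List.index? (pvLetters key) (key.getD i '?') with
  | none =>
    rw [PySem.List.index?_eq_none_iff] at h
    exact absurd hmem h
  | some k =>
    obtain ⟨hk, hget, _⟩ := PySem.List.getElem_of_index?_eq_some h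
    simp only [pvRnk, h, Option.getD_some]
    exact hget

theorem pvRnk_char (key : List Char) (i t : Nat) (hi : i < key.length)
    (ht : t < (pvLetters key).length) :
    (key.getD i '?' = (pvLetters key).getD t '?') ↔ pvRnk key i = t := by
  constructor
  · intro h
    rw [List.getD_eq_getElem _ '?' ht] at h
    have := pvIndex_self (pvLetters key) t (pvLetters_nodup key) ht
    rw [← h] at this
    unfold pvRnk
    rw [this]
    rfl
  · intro h
    have := pvRnk_getElem key i hi
    rw [List.getD_eq_getElem _ '?' ht, ← this]
    simp only [h]

theorem pvRnk_surj (key : List Char) (t : Nat) (ht : t < (pvLetters key).length) :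
    ∃ i, i < key.length ∧ pvRnk key i = t := by
  have hmem : (pvLetters key)[t] ∈ key := by
    rw [← pvMem_letters]
    exact List.getElem_mem ht
  obtain ⟨i, hi, hget⟩ := List.mem_iff_getElem.mp hmem
  refine ⟨i, hi, ?_⟩
  rw [← pvRnk_char key i t hi ht, List.getD_eq_getElem _ '?' hi, List.getD_eq_getElem _ '?' ht,
    hget]

-- ---- groups ----

theorem pvG_mem (key : List Char) (t : Nat) (ht : t < (pvLetters key).length) (j : Int) :
    j ∈ pvG key t ↔ 0 ≤ j ∧ j < key.length ∧ pvRnk key j.toNat = t := by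
  unfold pvG pvBGroup
  rw [List.mem_filter]
  simp only [PySem.List.len_eq, PySem.List.mem_pyRange_one]
  constructor
  · rintro ⟨⟨h0, hn⟩, hbeq⟩
    refine ⟨h0, hn, ?_⟩
    have hj : j = ((j.toNat : Nat) : Int) := by omega
    rw [hj, PySem.List.pyGetD_natCast] at hbeq
    have hjn : j.toNat < key.length := by omega
    exact (pvRnk_char key j.toNat t hjn ht).mp (by simpa using hbeq)
  · rintro ⟨h0, hn, hr⟩
    refine ⟨⟨h0, hn⟩, ?_⟩
    have hj : j = ((j.toNat : Nat) : Int) := by omega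
    have hjn : j.toNat < key.length := by omega
    rw [hj, PySem.List.pyGetD_natCast]
    simpa using (pvRnk_char key j.toNat t hjn ht).mpr hr

theorem pvG_nodup (key : List Char) (t : Nat) : (pvG key t).Nodup :=
  (PySem.List.nodup_pyRange_one _ _).filter _

theorem pvSelIds_mem (key : List Char) (lens : List Int) (t : Nat) (r : Int)
    (ht : t < (pvLetters key).length) (j : Int) :
    j ∈ pvSelIds key lens t r ↔
      0 ≤ j ∧ j < key.length ∧ pvRnk key j.toNat = t ∧ r < pvLen lens j.toNat := by
  unfold pvSelIds
  rw [List.mem_filter, pvG_mem key t ht]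
  unfold pvP pvLen
  constructor
  · rintro ⟨⟨h0, hn, hr⟩, hp⟩
    refine ⟨h0, hn, hr, ?_⟩
    have hj : j = ((j.toNat : Nat) : Int) := by omega
    rw [hj, PySem.List.pyGetD_natCast] at hp
    simpa using hp
  · rintro ⟨h0, hn, hr, hp⟩
    refine ⟨⟨h0, hn, hr⟩, ?_⟩
    have hj : j = ((j.toNat : Nat) : Int) := by omega
    rw [hj, PySem.List.pyGetD_natCast]
    simpa using hp

theorem pvSelIds_nodup (key : List Char) (lens : List Int) (t : Nat) (r : Int) :
    (pvSelIds key lens t r).Nodup := (pvG_nodup key t).filter _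

theorem pvG_ne_nil (key : List Char) (t : Nat) (ht : t < (pvLetters key).length) :
    pvG key t ≠ [] := by
  obtain ⟨i, hi, hr⟩ := pvRnk_surj key t ht
  intro h
  have : ((i : Nat) : Int) ∈ pvG key t := by
    rw [pvG_mem key t ht]
    refine ⟨by positivity, by exact_mod_cast hi, by simpa using hr⟩
  simp [h] at this

theorem pvR_isMax (key : List Char) (lens : List Int) (t : Nat) (i : Int)
    (hi : i ∈ pvG key t) : PySem.List.pyGetD lens i 0 ≤ pvR key lens t := by
  unfold pvR
  cases h : PySem.List.max? ((pvG key t).map (fun i => PySem.List.pyGetD lens i 0))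
      (fun x => x) with
  | none =>
    rw [PySem.List.max?_eq_none_iff] at h
    simp only [List.map_eq_nil_iff] at h
    simp [h] at hi
  | some m =>
    have := PySem.List.max?_isMax h (PySem.List.pyGetD lens i 0) (List.mem_map_of_mem hi)
    simpa using this

theorem pvR_le_of_all (key : List Char) (lens : List Int) (t : Nat) (r : Int)
    (ht : t < (pvLetters key).length)
    (h : ∀ i ∈ pvG key t, PySem.List.pyGetD lens i 0 ≤ r) : pvR key lens t ≤ r := by
  unfold pvR
  cases hm : PySem.List.max? ((pvG key t).map (fun i => PySem.List.pyGetD lens i 0))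
      (fun x => x) with
  | none =>
    rw [PySem.List.max?_eq_none_iff] at hm
    simp only [List.map_eq_nil_iff] at hm
    exact absurd hm (pvG_ne_nil key t ht)
  | some m =>
    have hmem := PySem.List.max?_mem hm
    obtain ⟨i, hi, rfl⟩ := List.mem_map.mp hmem
    simpa using h i hi

-- ---- A's iteration, decomposed ----

theorem pvAStep_split (enc : List Char) (l : List (Int × (Int × Int)))
    (kd : List (Int × Int)) (sol : List (List Char)) (c1 : Int) :
    l.foldl (pvAStep enc) (kd, sol, c1) =
      ((l.map (·.1)).foldl pvKdStep kd, (l.map (·.1)).foldl (pvSolStep enc) (sol, c1)) := by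
  induction l generalizing kd sol c1 with
  | nil => rfl
  | cons a l ih =>
    simp only [List.foldl_cons, List.map_cons]
    exact ih _ _ _

theorem pvKdAt_length (key : List Char) (lens : List Int) (t : Nat) (r : Int) :
    (pvKdAt key lens t r).length = key.length := by
  simp [pvKdAt]

theorem pvKdAt_getD (key : List Char) (lens : List Int) (t : Nat) (r : Int) (j : Nat)
    (hj : j < key.length) :
    PySem.List.pyGetD (pvKdAt key lens t r) ((j : Nat) : Int) (0, 0) =
      (((pvRnk key j : Int)) - t, pvRem key lens t r j) := by
  rw [PySem.List.pyGetD_natCast]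
  unfold pvKdAt
  rw [List.getD_eq_getElem _ _ (by simpa using hj)]
  simp

theorem pvASel_eq (key : List Char) (lens : List Int) (t : Nat) (r : Int)
    (ht : t < (pvLetters key).length) (hlen : lens.length = key.length) :
    pvASel (pvKdAt key lens t r) =
      (pvSelIds key lens t r).map
        (fun f => (f, PySem.List.pyGetD (pvKdAt key lens t r) f (0, 0))) := by
  unfold pvASel
  rw [PySem.List.foldl_append_if
    (fun f => ((PySem.List.pyGetD (pvKdAt key lens t r) f (0, 0)).1 == 0 &&
      decide ((PySem.List.pyGetD (pvKdAt key lens t r) f (0, 0)).2 > 0)))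
    (fun f => (f, PySem.List.pyGetD (pvKdAt key lens t r) f (0, 0)))]
  rw [List.nil_append]
  congr 1
  have hlen2 : PySem.List.len (pvKdAt key lens t r) = (key.length : Int) := by
    simp [pvKdAt_length]
  rw [hlen2]
  unfold pvSelIds pvG pvBGroup
  rw [List.filter_filter]
  simp only [PySem.List.len_eq]
  apply List.filter_congr
  intro j hj
  rw [PySem.List.mem_pyRange_one] at hj
  have hj' : j = ((j.toNat : Nat) : Int) := by omega
  have hjn : j.toNat < key.length := by omega
  rw [hj', pvKdAt_getD key lens t r j.toNat hjn, PySem.List.pyGetD_natCast]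
  unfold pvP pvRem pvLen
  dsimp only
  simp only [PySem.List.pyGetD_natCast]
  by_cases hr : pvRnk key j.toNat = t
  · have hbeq : (key.getD j.toNat '?' == (pvLetters key).getD t '?') = true := by
      rw [beq_iff_eq]
      exact (pvRnk_char key j.toNat t hjn ht).mpr hr
    rw [hbeq]
    rw [show ((pvRnk key j.toNat : Int) - t == 0) = true from by
      rw [beq_iff_eq]; omega]
    rw [if_neg (by omega), if_pos hr]
    by_cases hp : lens.getD j.toNat 0 ≤ r
    · rw [if_pos hp]
      simp only [Bool.true_and, Bool.and_true]
      rw [show (decide ((0:Int) > 0)) = false from by norm_num]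
      symm
      rw [decide_eq_false_iff_not]
      omega
    · rw [if_neg hp]
      simp only [Bool.true_and, Bool.and_true]
      rw [show (decide (lens.getD j.toNat 0 - r > 0)) = true from by
          simp only [decide_eq_true_eq]
          omega]
      symm
      rw [decide_eq_true_eq]
      omega
  · have hbeq : (key.getD j.toNat '?' == (pvLetters key).getD t '?') = false := by
      rw [beq_eq_false_iff_ne]
      intro h
      exact hr ((pvRnk_char key j.toNat t hjn ht).mp h)
    rw [hbeq]
    rw [show ((pvRnk key j.toNat : Int) - t == 0) = false from by
      rw [beq_eq_false_iff_ne]; intro h; omega]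
    simp

theorem pvKdFold_length (ids : List Int) (kd : List (Int × Int)) :
    (ids.foldl pvKdStep kd).length = kd.length := by
  induction ids generalizing kd with
  | nil => rfl
  | cons a ids ih => simp [List.foldl_cons, ih, pvKdStep, PySem.List.length_pySetD]

theorem pvGetD_setD_int (kd : List (Int × Int)) (a : Int) (h0 : 0 ≤ a)
    (hlt : a < (kd.length : Int)) (v : Int × Int) (m : Nat) :
    PySem.List.pyGetD (PySem.List.pySetD kd a v) ((m : Nat) : Int) (0, 0) =
      if ((m : Nat) : Int) = a then v else PySem.List.pyGetD kd ((m : Nat) : Int) (0, 0) := by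
  obtain ⟨an, rfl⟩ : ∃ an : Nat, a = ((an : Nat) : Int) := ⟨a.toNat, by omega⟩
  rw [PySem.List.pyGetD_pySetD_natCast kd an m v _ (by omega)]
  by_cases h : m = an
  · rw [if_pos h, if_pos (by exact_mod_cast h)]
  · rw [if_neg h, if_neg (by exact_mod_cast h)]

theorem pvKdFold_getD (ids : List Int) (kd : List (Int × Int)) (hnd : ids.Nodup)
    (hin : ∀ x ∈ ids, 0 ≤ x ∧ x < (kd.length : Int)) (j : Nat) (hj : j < kd.length) :
    PySem.List.pyGetD (ids.foldl pvKdStep kd) ((j : Nat) : Int) (0, 0) =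
      if ((j : Int) ∈ ids) then
        ((PySem.List.pyGetD kd ((j : Nat) : Int) (0, 0)).1,
          (PySem.List.pyGetD kd ((j : Nat) : Int) (0, 0)).2 - 1)
      else PySem.List.pyGetD kd ((j : Nat) : Int) (0, 0) := by
  induction ids generalizing kd with
  | nil => simp
  | cons a ids ih =>
    have ha := hin a (List.mem_cons_self)
    have hnd' : ids.Nodup := hnd.of_cons
    have hanotin : a ∉ ids := (List.nodup_cons.mp hnd).1
    simp only [List.foldl_cons]
    have hlen' : (pvKdStep kd a).length = kd.length := by
      simp [pvKdStep, PySem.List.length_pySetD]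
    rw [ih (pvKdStep kd a) hnd'
      (fun x hx => by rw [hlen']; exact hin x (List.mem_cons_of_mem a hx)) (by omega)]
    have hget : ∀ (m : Nat),
        PySem.List.pyGetD (pvKdStep kd a) ((m : Nat) : Int) (0, 0) =
          if ((m : Nat) : Int) = a then
            ((PySem.List.pyGetD kd a (0, 0)).1, (PySem.List.pyGetD kd a (0, 0)).2 - 1)
          else PySem.List.pyGetD kd ((m : Nat) : Int) (0, 0) := by
      intro m
      unfold pvKdStep
      exact pvGetD_setD_int kd a ha.1 ha.2 _ m
    by_cases hmem : (j : Int) ∈ ids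
    · rw [if_pos hmem, if_pos (List.mem_cons_of_mem a hmem)]
      have hja : ((j : Nat) : Int) ≠ a := by
        intro h
        rw [h] at hmem
        exact hanotin hmem
      rw [hget j, if_neg hja]
    · rw [if_neg hmem]
      by_cases hja : ((j : Nat) : Int) = a
      · have : (j : Int) ∈ a :: ids := by simp [hja]
        rw [if_pos this, hget j, if_pos hja, hja]
      · have : (j : Int) ∉ a :: ids := by simp [hja, hmem]
        rw [if_neg this, hget j, if_neg hja]

theorem pvKdFold_kdAt (key : List Char) (lens : List Int) (t : Nat) (r : Int)
    (ht : t < (pvLetters key).length) (hlen : lens.length = key.length) :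
    (pvSelIds key lens t r).foldl pvKdStep (pvKdAt key lens t r) = pvKdAt key lens t (r + 1) := by
  have hbnd : ∀ x ∈ pvSelIds key lens t r, 0 ≤ x ∧ x < ((pvKdAt key lens t r).length : Int) := by
    intro x hx
    rw [pvSelIds_mem key lens t r ht] at hx
    rw [pvKdAt_length]
    exact ⟨hx.1, hx.2.1⟩
  apply List.ext_getElem
  · rw [pvKdFold_length, pvKdAt_length, pvKdAt_length]
  · intro j hj1 hj2
    have hjn : j < key.length := by rwa [pvKdFold_length, pvKdAt_length] at hj1
    have h1 : PySem.List.pyGetD ((pvSelIds key lens t r).foldl pvKdStep (pvKdAt key lens t r))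
        ((j : Nat) : Int) (0, 0) =
        ((pvSelIds key lens t r).foldl pvKdStep (pvKdAt key lens t r))[j] := by
      rw [PySem.List.pyGetD_natCast, List.getD_eq_getElem _ _ hj1]
    have h2 : PySem.List.pyGetD (pvKdAt key lens t (r + 1)) ((j : Nat) : Int) (0, 0) =
        (pvKdAt key lens t (r + 1))[j] := by
      rw [PySem.List.pyGetD_natCast, List.getD_eq_getElem _ _ hj2]
    rw [← h1, ← h2]
    rw [pvKdFold_getD (pvSelIds key lens t r) (pvKdAt key lens t r)
      (pvSelIds_nodup key lens t r) hbnd j (by rwa [pvKdAt_length])]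
    rw [pvKdAt_getD key lens t r j hjn, pvKdAt_getD key lens t (r + 1) j hjn]
    by_cases hmem : ((j : Int)) ∈ pvSelIds key lens t r
    · rw [if_pos hmem]
      rw [pvSelIds_mem key lens t r ht] at hmem
      obtain ⟨-, -, hrk, hlt⟩ := hmem
      simp only [Int.toNat_natCast] at hrk hlt
      dsimp only
      rw [Prod.mk.injEq]
      refine ⟨rfl, ?_⟩
      unfold pvRem
      split_ifs <;> omega
    · rw [if_neg hmem]
      rw [Prod.mk.injEq]
      refine ⟨rfl, ?_⟩
      have hcase : ¬ (pvRnk key j = t ∧ r < pvLen lens j) := by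
        rintro ⟨hq1, hq2⟩
        apply hmem
        rw [pvSelIds_mem key lens t r ht]
        refine ⟨by positivity, by exact_mod_cast hjn, ?_, ?_⟩
        · simpa using hq1
        · simpa using hq2
      unfold pvRem
      split_ifs <;> omega

theorem pvSolFold_eq (enc key : List Char) (lens : List Int) (t : Nat) (r : Int)
    (st : List (List Char) × Int) :
    (pvSelIds key lens t r).foldl (pvSolStep enc) st = pvBRound enc lens (pvG key t) r st := by
  have h : pvBRound enc lens (pvG key t) r st =
      (pvG key t).foldl
        (fun st i => if pvP lens r i = true then pvSolStep enc st i else st) st := rfl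
  rw [h, PySem.List.foldl_if_eq_foldl_filter (pvP lens r) (pvSolStep enc)]
  rfl

theorem pvIterStep (enc key : List Char) (lens : List Int) (t : Nat) (r : Int)
    (ht : t < (pvLetters key).length) (hlen : lens.length = key.length)
    (sol : List (List Char)) (c1 : Int) :
    (pvASel (pvKdAt key lens t r)).foldl (pvAStep enc) (pvKdAt key lens t r, sol, c1) =
      (pvKdAt key lens t (r + 1), pvBRound enc lens (pvG key t) r (sol, c1)) := by
  rw [pvASel_eq key lens t r ht hlen, pvAStep_split]
  rw [List.map_map]
  have hmap : ((fun x : Int × Int × Int => x.1) ∘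
      (fun f => (f, PySem.List.pyGetD (pvKdAt key lens t r) f (0, 0)))) = id := rfl
  rw [hmap, List.map_id]
  rw [pvKdFold_kdAt key lens t r ht hlen, pvSolFold_eq]

-- ---- sums of remaining lengths ----

theorem pvRem_nonneg (key : List Char) (lens : List Int) (hnn : ∀ x ∈ lens, 0 ≤ x)
    (t : Nat) (r : Int) (i : Nat) : 0 ≤ pvRem key lens t r i := by
  have hl : 0 ≤ pvLen lens i := by
    unfold pvLen
    by_cases hi : i < lens.length
    · rw [List.getD_eq_getElem _ _ hi]
      exact hnn _ (List.getElem_mem hi)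
    · rw [List.getD_eq_default _ _ (by omega)]
  unfold pvRem
  split_ifs <;> omega

theorem pvSumRem_nonneg (key : List Char) (lens : List Int) (hnn : ∀ x ∈ lens, 0 ≤ x)
    (t : Nat) (r : Int) : 0 ≤ pvSumRem key lens t r := by
  unfold pvSumRem
  apply List.sum_nonneg
  intro x hx
  obtain ⟨i, -, rfl⟩ := List.mem_map.mp hx
  exact pvRem_nonneg key lens hnn t r i

theorem pvSum_zero_mem (l : List Int) (hnn : ∀ x ∈ l, 0 ≤ x) (hz : l.sum = 0) :
    ∀ x ∈ l, x = 0 := by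
  induction l with
  | nil => simp
  | cons a l ih =>
    have ha := hnn a List.mem_cons_self
    have hrest : 0 ≤ l.sum := List.sum_nonneg (fun x hx => hnn x (List.mem_cons_of_mem a hx))
    simp only [List.sum_cons] at hz
    intro x hx
    rcases List.mem_cons.mp hx with h | h
    · omega
    · exact ih (fun y hy => hnn y (List.mem_cons_of_mem a hy)) (by omega) x h

theorem pvSumRem_zero_all (key : List Char) (lens : List Int) (hnn : ∀ x ∈ lens, 0 ≤ x)
    (t : Nat) (r : Int) (h : pvSumRem key lens t r = 0) :
    ∀ i, i < key.length → pvRem key lens t r i = 0 := by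
  intro i hi
  exact pvSum_zero_mem _ (fun x hx => by
      obtain ⟨j, -, rfl⟩ := List.mem_map.mp hx
      exact pvRem_nonneg key lens hnn t r j) h _
    (List.mem_map.mpr ⟨i, List.mem_range.mpr hi, rfl⟩)

theorem pvSumRem_pos_ex (key : List Char) (lens : List Int) (hnn : ∀ x ∈ lens, 0 ≤ x)
    (t : Nat) (r : Int) (h : 0 < pvSumRem key lens t r) :
    ∃ i, i < key.length ∧ 0 < pvRem key lens t r i := by
  by_contra hc
  push_neg at hc
  have : pvSumRem key lens t r = 0 := by
    unfold pvSumRem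
    have h0 : ∀ x ∈ (List.range key.length).map (pvRem key lens t r), x = 0 := by
      intro x hx
      obtain ⟨i, hi, rfl⟩ := List.mem_map.mp hx
      have := hc i (List.mem_range.mp hi)
      have := pvRem_nonneg key lens hnn t r i
      omega
    exact List.sum_eq_zero h0
  omega

theorem pvCount_eq (key : List Char) (lens : List Int) (t : Nat) (r : Int)
    (ht : t < (pvLetters key).length) :
    pvSumRem key lens t r =
      pvSumRem key lens t (r + 1) +
        (((List.range key.length).countP
            (fun i => decide (pvRnk key i = t) && pvP lens r ((i : Nat) : Int))) : Int) := by
  unfold pvSumRem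
  have hsplit : ∀ i ∈ List.range key.length,
      pvRem key lens t r i =
        pvRem key lens t (r + 1) i +
          (if (decide (pvRnk key i = t) && pvP lens r ((i : Nat) : Int)) = true
            then (1 : Int) else 0) := by
    intro i hi
    unfold pvRem pvP pvLen
    rw [PySem.List.pyGetD_natCast]
    split_ifs with h1 h2 h3 h4 h5 <;> simp_all <;> omega
  calc ((List.range key.length).map (pvRem key lens t r)).sum
      = ((List.range key.length).map
          (fun i => pvRem key lens t (r + 1) i +
            (if (decide (pvRnk key i = t) && pvP lens r ((i : Nat) : Int)) = true
              then (1 : Int) else 0))).sum := by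
        congr 1
        exact List.map_congr_left hsplit
    _ = ((List.range key.length).map (pvRem key lens t (r + 1))).sum +
          (((List.range key.length).countP
            (fun i => decide (pvRnk key i = t) && pvP lens r ((i : Nat) : Int))) : Int) := by
        rw [PySem.List.sum_map_add_int]
        congr 1
        rw [PySem.List.sum_map_ite_one_zero]
    _ = _ := rfl

theorem pvCountG (key : List Char) (lens : List Int) (t : Nat) (r : Int)
    (ht : t < (pvLetters key).length) :
    ((pvSelIds key lens t r).length : Int) =
      (((List.range key.length).countP
          (fun i => decide (pvRnk key i = t) && pvP lens r ((i : Nat) : Int))) : Int) := by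
  have h1 : (pvSelIds key lens t r).length = List.countP (pvP lens r) (pvG key t) := by
    unfold pvSelIds
    rw [List.countP_eq_length_filter]
  rw [h1]
  unfold pvG pvBGroup
  rw [List.countP_filter]
  simp only [PySem.List.len_eq]
  rw [PySem.List.pyRange_one]
  rw [List.countP_map]
  simp only [sub_zero, Int.toNat_natCast]
  rw [Nat.cast_inj]
  apply List.countP_congr
  intro i hi
  have hin : i < key.length := List.mem_range.mp hi
  simp only [Function.comp_apply, zero_add, PySem.List.pyGetD_natCast]
  by_cases hr : pvRnk key i = t
  · have hbeq : (key.getD i '?' == (pvLetters key).getD t '?') = true := by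
      rw [beq_iff_eq]
      exact (pvRnk_char key i t hin ht).mpr hr
    rw [hbeq]
    simp [hr, Bool.and_comm, pvP]
  · have hbeq : (key.getD i '?' == (pvLetters key).getD t '?') = false := by
      rw [beq_eq_false_iff_ne]
      intro h
      exact hr ((pvRnk_char key i t hin ht).mp h)
    rw [hbeq]
    simp [hr]

theorem pvShift (key : List Char) (lens : List Int) (t : Nat) (r : Int)
    (ht : t < (pvLetters key).length) (hlen : lens.length = key.length)
    (hnn : ∀ x ∈ lens, 0 ≤ x)
    (hsel : pvSelIds key lens t r = []) :
    (pvKdAt key lens t r).map (fun e => (e.1 - 1, e.2)) = pvKdAt key lens (t + 1) 0 ∧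
      pvSumRem key lens t r = pvSumRem key lens (t + 1) 0 := by
  have hno : ∀ i, i < key.length → pvRnk key i = t → pvLen lens i ≤ r := by
    intro i hi hr
    by_contra hc
    push_neg at hc
    have : ((i : Nat) : Int) ∈ pvSelIds key lens t r := by
      rw [pvSelIds_mem key lens t r ht]
      exact ⟨by positivity, by exact_mod_cast hi, by simpa using hr, by simpa using hc⟩
    simp [hsel] at this
  have hrem : ∀ i ∈ List.range key.length,
      pvRem key lens t r i = pvRem key lens (t + 1) 0 i := by
    intro i hi
    have hi' := List.mem_range.mp hi
    unfold pvRem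
    by_cases h1 : pvRnk key i < t
    · rw [if_pos h1, if_pos (by omega)]
    · by_cases h2 : pvRnk key i = t
      · rw [if_neg h1, if_pos h2, if_pos (hno i hi' h2), if_pos (by omega)]
      · rw [if_neg h1, if_neg h2, if_neg (by omega)]
        by_cases h3 : pvRnk key i = t + 1
        · have hl : 0 ≤ pvLen lens i := by
            unfold pvLen
            by_cases hii : i < lens.length
            · rw [List.getD_eq_getElem _ _ hii]
              exact hnn _ (List.getElem_mem hii)
            · rw [List.getD_eq_default _ _ (by omega)]
          rw [if_pos h3]
          split_ifs <;> omega
        · rw [if_neg h3]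
  constructor
  · unfold pvKdAt
    rw [List.map_map]
    apply List.map_congr_left
    intro i hi
    have := hrem i hi
    simp only [Function.comp_apply]
    rw [this, Prod.mk.injEq]
    refine ⟨by push_cast; ring, rfl⟩
  · unfold pvSumRem
    congr 1
    exact List.map_congr_left hrem

-- ---- pos bookkeeping of a round ----

theorem pvBRound_pos (enc : List Char) (lens : List Int) (g : List Int) (r : Int)
    (st : List (List Char) × Int) :
    (pvBRound enc lens g r st).2 = st.2 + (g.countP (pvP lens r) : Int) := by
  induction g generalizing st with
  | nil => simp [pvBRound]
  | cons a g ih =>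
    by_cases h : pvP lens r a = true
    · have h1 : pvBRound enc lens (a :: g) r st =
          pvBRound enc lens g r (pvSolStep enc st a) := by
        unfold pvBRound pvP pvSolStep at *
        simp only [List.foldl_cons, if_pos h]
      rw [h1, ih, List.countP_cons]
      unfold pvSolStep
      simp only [h, if_pos]
      push_cast
      ring
    · have h1 : pvBRound enc lens (a :: g) r st = pvBRound enc lens g r st := by
        unfold pvBRound pvP at *
        simp only [List.foldl_cons, if_neg h]
      rw [h1, ih, List.countP_cons]
      simp only [h, if_neg, Bool.false_eq_true]
      push_cast
      ring

theorem pvSelCount (key : List Char) (lens : List Int) (t : Nat) (r : Int)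
    (ht : t < (pvLetters key).length) :
    ((pvG key t).countP (pvP lens r) : Int) = ((pvSelIds key lens t r).length : Int) := by
  unfold pvSelIds
  rw [List.countP_eq_length_filter]

-- ---- no-op rounds / groups ----

theorem pvBRound_id (enc : List Char) (lens : List Int) (g : List Int) (r : Int)
    (h : ∀ i ∈ g, PySem.List.pyGetD lens i 0 ≤ r) (st : List (List Char) × Int) :
    pvBRound enc lens g r st = st := by
  induction g generalizing st with
  | nil => rfl
  | cons a g ih =>
    have ha := h a List.mem_cons_self
    have h1 : pvBRound enc lens (a :: g) r st = pvBRound enc lens g r st := by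
      unfold pvBRound
      simp only [List.foldl_cons]
      rw [if_neg (by simp only [decide_eq_true_eq]; omega)]
    rw [h1]
    exact ih (fun i hi => h i (List.mem_cons_of_mem a hi)) st

theorem pvRounds_peel (enc key : List Char) (lens : List Int) (t : Nat) (r : Int)
    (st : List (List Char) × Int) :
    pvRounds enc key lens t r st =
      pvRounds enc key lens t (r + 1) (pvBRound enc lens (pvG key t) r st) := by
  by_cases hr : r < pvR key lens t
  · unfold pvRounds
    rw [PySem.List.pyRange_one_cons hr, List.foldl_cons]
  · unfold pvRounds
    rw [PySem.List.pyRange_one_eq_nil (by omega), PySem.List.pyRange_one_eq_nil (by omega),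
      List.foldl_nil, List.foldl_nil]
    rw [pvBRound_id enc lens (pvG key t) r
      (fun i hi => le_trans (pvR_isMax key lens t i hi) (by omega)) st]

theorem pvRounds_id (enc key : List Char) (lens : List Int) (t : Nat) (r : Int)
    (ht : t < (pvLetters key).length)
    (h : ∀ i ∈ pvG key t, PySem.List.pyGetD lens i 0 ≤ r) (st : List (List Char) × Int) :
    pvRounds enc key lens t r st = st := by
  unfold pvRounds
  rw [PySem.List.pyRange_one_eq_nil (pvR_le_of_all key lens t r ht h), List.foldl_nil]

theorem pvGroupStep_rounds (enc key : List Char) (lens : List Int) (t : Nat)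
    (ht : t < (pvLetters key).length) (st : List (List Char) × Int) :
    pvBGroupStep enc key lens st ((pvLetters key).getD t '?') = pvRounds enc key lens t 0 st := by
  rfl

theorem pvBFrom_peel (enc key : List Char) (lens : List Int) (t : Nat)
    (ht : t < (pvLetters key).length) (st : List (List Char) × Int) :
    pvBFrom enc key lens t st = pvBFrom enc key lens (t + 1) (pvRounds enc key lens t 0 st) := by
  unfold pvBFrom
  rw [List.drop_eq_getElem_cons ht, List.foldl_cons]
  rw [← List.getD_eq_getElem _ '?' ht, pvGroupStep_rounds enc key lens t ht]

theorem pvFoldl_id {α β : Type} (l : List α) (f : β → α → β) (st : β)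
    (h : ∀ st x, x ∈ l → f st x = st) : l.foldl f st = st := by
  induction l generalizing st with
  | nil => rfl
  | cons a l ih =>
    rw [List.foldl_cons, h st a List.mem_cons_self]
    exact ih st (fun st x hx => h st x (List.mem_cons_of_mem a hx))

theorem pvBFrom_id (enc key : List Char) (lens : List Int) (hlen : lens.length = key.length)
    (hnn : ∀ x ∈ lens, 0 ≤ x) (t : Nat) (r : Int)
    (hz : pvSumRem key lens t r = 0) (st : List (List Char) × Int) :
    pvBFrom enc key lens (t + 1) st = st := by
  unfold pvBFrom
  apply pvFoldl_id
  intro st letter hmem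
  obtain ⟨k, hk, hget⟩ := List.mem_iff_getElem.mp hmem
  rw [List.getElem_drop] at hget
  have hku : t + 1 + k < (pvLetters key).length := by
    have := List.length_drop (l := pvLetters key) (i := t + 1)
    omega
  -- every column of this later group has remaining length 0, hence zero length
  have hzero : ∀ i ∈ pvG key (t + 1 + k), PySem.List.pyGetD lens i 0 ≤ 0 := by
    intro i hi
    rw [pvG_mem key (t + 1 + k) hku] at hi
    obtain ⟨h0, hn, hr⟩ := hi
    have hrem := pvSumRem_zero_all key lens hnn t r hz i.toNat (by omega)
    unfold pvRem at hrem
    rw [hr] at hrem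
    rw [if_neg (by omega), if_neg (by omega)] at hrem
    have : i = ((i.toNat : Nat) : Int) := by omega
    rw [this, PySem.List.pyGetD_natCast]
    unfold pvLen at hrem
    omega
  have hG : pvBGroup key letter = pvG key (t + 1 + k) := by
    unfold pvG
    rw [List.getD_eq_getElem _ '?' hku, hget]
  have hR : pvR key lens (t + 1 + k) ≤ 0 := pvR_le_of_all key lens (t + 1 + k) 0 hku hzero
  unfold pvBGroupStep
  dsimp only
  rw [hG]
  rw [show (PySem.List.max? (List.map (fun i => PySem.List.pyGetD lens i 0)
      (pvG key (t + 1 + k))) (fun x => x)).getD 0 = pvR key lens (t + 1 + k) from rfl]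
  rw [PySem.List.pyRange_one_eq_nil (by omega), List.foldl_nil]

-- ---- one unfolding of A's while loop ----

theorem pvAWhile_stop (enc : List Char) (fuel : Nat) (kd : List (Int × Int))
    (sol : List (List Char)) (c1 : Int) (h : ¬ c1 < 6) :
    pvAWhile enc (fuel + 1) kd sol c1 = sol := by
  simp [pvAWhile, h]

theorem pvAWhile_step_pos (enc : List Char) (fuel : Nat) (kd : List (Int × Int))
    (sol : List (List Char)) (c1 : Int) (h : c1 < 6) (hs : (pvASel kd).isEmpty = false) :
    pvAWhile enc (fuel + 1) kd sol c1 =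
      pvAWhile enc fuel ((pvASel kd).foldl (pvAStep enc) (kd, sol, c1)).1
        ((pvASel kd).foldl (pvAStep enc) (kd, sol, c1)).2.1
        ((pvASel kd).foldl (pvAStep enc) (kd, sol, c1)).2.2 := by
  simp [pvAWhile, h, hs]

theorem pvAWhile_step_shift (enc : List Char) (fuel : Nat) (kd : List (Int × Int))
    (sol : List (List Char)) (c1 : Int) (h : c1 < 6) (hs : (pvASel kd).isEmpty = true) :
    pvAWhile enc (fuel + 1) kd sol c1 =
      pvAWhile enc fuel
        ((pvASel (kd.map (fun e => (e.1 - 1, e.2)))).foldl (pvAStep enc)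
          (kd.map (fun e => (e.1 - 1, e.2)), sol, c1)).1
        ((pvASel (kd.map (fun e => (e.1 - 1, e.2)))).foldl (pvAStep enc)
          (kd.map (fun e => (e.1 - 1, e.2)), sol, c1)).2.1
        ((pvASel (kd.map (fun e => (e.1 - 1, e.2)))).foldl (pvAStep enc)
          (kd.map (fun e => (e.1 - 1, e.2)), sol, c1)).2.2 := by
  simp [pvAWhile, h, hs]

-- ---- the main simulation ----

theorem pvMain (enc key : List Char) (lens : List Int)
    (hlen : lens.length = key.length) (hnn : ∀ x ∈ lens, 0 ≤ x)
    (fuel : Nat) (t : Nat) (r : Int) (sol : List (List Char)) (c1 : Int)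
    (ht : t < (pvLetters key).length)
    (hc1 : c1 = 6 - pvSumRem key lens t r)
    (hfuel : (pvLetters key).length - t + (pvSumRem key lens t r).toNat + 1 ≤ fuel) :
    pvAWhile enc fuel (pvKdAt key lens t r) sol c1 =
      (pvBFrom enc key lens (t + 1) (pvRounds enc key lens t r (sol, c1))).1 := by
  induction fuel generalizing t r sol c1 with
  | zero => omega
  | succ fuel ih =>
    have hsnn := pvSumRem_nonneg key lens hnn t r
    by_cases hc : c1 < 6
    · -- still work to do
      have hpos : 0 < pvSumRem key lens t r := by omega
      by_cases hsel : pvSelIds key lens t r = []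
      · -- current group is exhausted: A shifts all ranks down by one
        have hselA : pvASel (pvKdAt key lens t r) = [] := by
          rw [pvASel_eq key lens t r ht hlen, hsel, List.map_nil]
        -- some column is still unserved, and it lies in a later group
        obtain ⟨i0, hi0, hrem0⟩ := pvSumRem_pos_ex key lens hnn t r hpos
        have hrnk0 : t + 1 ≤ pvRnk key i0 := by
          by_contra hcon
          push_neg at hcon
          unfold pvRem at hrem0
          by_cases h1 : pvRnk key i0 < t
          · rw [if_pos h1] at hrem0; omega
          · have h2 : pvRnk key i0 = t := by omega
            rw [if_neg h1, if_pos h2] at hrem0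
            have hmm : ((i0 : Nat) : Int) ∈ pvSelIds key lens t r := by
              rw [pvSelIds_mem key lens t r ht]
              simp only [Int.toNat_natCast]
              refine ⟨by positivity, by exact_mod_cast hi0, h2, ?_⟩
              split_ifs at hrem0 <;> omega
            simp [hsel] at hmm
        have ht1 : t + 1 < (pvLetters key).length := by
          have := pvRnk_lt key i0 hi0
          omega
        obtain ⟨hkd2, hsum2⟩ := pvShift key lens t r ht hlen hnn hsel
        have hallle : ∀ i ∈ pvG key t, PySem.List.pyGetD lens i 0 ≤ r := by
          intro i hi
          rw [pvG_mem key t ht] at hi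
          obtain ⟨h0, hn, hr⟩ := hi
          have : i = ((i.toNat : Nat) : Int) := by omega
          rw [this, PySem.List.pyGetD_natCast]
          by_contra hcon
          push_neg at hcon
          have hmm2 : ((i.toNat : Nat) : Int) ∈ pvSelIds key lens t r := by
            rw [pvSelIds_mem key lens t r ht]
            simp only [Int.toNat_natCast]
            exact ⟨by positivity, by omega, hr, by simpa [pvLen] using hcon⟩
          simp [hsel] at hmm2
        -- unfold one iteration of A's while loop
        rw [pvAWhile_step_shift enc fuel _ sol c1 hc (by simp [hselA])]
        rw [hkd2]
        rw [pvIterStep enc key lens (t + 1) 0 ht1 hlen sol c1]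
        dsimp only
        rw [show (0 : Int) + 1 = 1 from by norm_num]
        have hb := pvBRound_pos enc lens (pvG key (t + 1)) 0 (sol, c1)
        have hcnt := pvCount_eq key lens (t + 1) 0 ht1
        rw [show (0 : Int) + 1 = 1 from by norm_num] at hcnt
        have hcg := pvSelCount key lens (t + 1) 0 ht1
        have hcg2 := pvCountG key lens (t + 1) 0 ht1
        have hc1' : (pvBRound enc lens (pvG key (t + 1)) 0 (sol, c1)).2 =
            6 - pvSumRem key lens (t + 1) 1 := by
          rw [hb]
          omega
        have hfuel' : (pvLetters key).length - (t + 1) +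
            (pvSumRem key lens (t + 1) 1).toNat + 1 ≤ fuel := by
          have hnn1 := pvSumRem_nonneg key lens hnn (t + 1) 1
          have hcp : (0 : Int) ≤ ((pvG key (t + 1)).countP (pvP lens 0) : Int) := by positivity
          omega
        have := ih (t + 1) 1 (pvBRound enc lens (pvG key (t + 1)) 0 (sol, c1)).1
          (pvBRound enc lens (pvG key (t + 1)) 0 (sol, c1)).2 ht1 hc1' hfuel'
        rw [this]
        -- now align the B side
        rw [pvRounds_id enc key lens t r ht hallle (sol, c1)]
        rw [pvBFrom_peel enc key lens (t + 1) ht1 (sol, c1)]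
        rw [pvRounds_peel enc key lens (t + 1) 0 (sol, c1)]
        simp
      · -- A serves round r of group t
        have hselA : pvASel (pvKdAt key lens t r) ≠ [] := by
          rw [pvASel_eq key lens t r ht hlen]
          simpa using hsel
        rw [pvAWhile_step_pos enc fuel _ sol c1 hc (by simp [List.isEmpty_eq_false_iff, hselA])]
        rw [pvIterStep enc key lens t r ht hlen sol c1]
        dsimp only
        have hb := pvBRound_pos enc lens (pvG key t) r (sol, c1)
        have hcnt := pvCount_eq key lens t r ht
        have hcg := pvSelCount key lens t r ht
        have hcg2 := pvCountG key lens t r ht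
        have hc1' : (pvBRound enc lens (pvG key t) r (sol, c1)).2 =
            6 - pvSumRem key lens t (r + 1) := by
          rw [hb]
          omega
        have hlenpos : 1 ≤ (pvSelIds key lens t r).length := by
          have := List.length_pos_iff.mpr hsel
          omega
        have hfuel' : (pvLetters key).length - t + (pvSumRem key lens t (r + 1)).toNat + 1
            ≤ fuel := by
          have hnn1 := pvSumRem_nonneg key lens hnn t (r + 1)
          omega
        have := ih t (r + 1) (pvBRound enc lens (pvG key t) r (sol, c1)).1
          (pvBRound enc lens (pvG key t) r (sol, c1)).2 ht hc1' hfuel'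
        rw [this]
        rw [pvRounds_peel enc key lens t r (sol, c1)]
    · -- count1 has reached 6: A stops, and everything remaining on the B side is a no-op
      have hz : pvSumRem key lens t r = 0 := by omega
      rw [pvAWhile_stop enc fuel _ sol c1 hc]
      have hallle : ∀ i ∈ pvG key t, PySem.List.pyGetD lens i 0 ≤ r := by
        intro i hi
        rw [pvG_mem key t ht] at hi
        obtain ⟨h0, hn, hr⟩ := hi
        have hrem := pvSumRem_zero_all key lens hnn t r hz i.toNat (by omega)
        unfold pvRem at hrem
        rw [hr] at hrem
        rw [if_neg (by omega), if_pos rfl] at hrem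
        have : i = ((i.toNat : Nat) : Int) := by omega
        rw [this, PySem.List.pyGetD_natCast]
        unfold pvLen at hrem
        split_ifs at hrem <;> omega
      rw [pvRounds_id enc key lens t r ht hallle (sol, c1)]
      rw [pvBFrom_id enc key lens hlen hnn t r hz (sol, c1)]

-- ---- initial data ----

theorem pvKeyEq (Serial : String) :
    Serial.toList.foldl
        (fun k c => if (PySem.Chars.isdigit c == false) then k ++ [c] else k) [] =
      Serial.toList.filter (fun c => !(PySem.Chars.isdigit c)) := by
  rw [PySem.List.foldl_append_if_eq_filter (fun c => PySem.Chars.isdigit c == false)]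
  rw [List.nil_append]
  apply List.filter_congr
  intro c _
  cases PySem.Chars.isdigit c <;> rfl

theorem pvKdBuild (sk : List Char) (cs : List Char) :
    ∀ (acc : List (Int × Int)) (d : Int),
      (cs.foldl
          (fun (st : List (Int × Int) × Int × Int) c =>
            (st.1 ++ [((((PySem.List.index? sk c).getD 0 : Nat) : Int), pvCeilDiv st.2.2 st.2.1)],
              st.2.1 - 1, st.2.2 - pvCeilDiv st.2.2 st.2.1))
          (acc, (cs.length : Int), d)).1 =
        acc ++ List.zipWith
          (fun c q => ((((PySem.List.index? sk c).getD 0 : Nat) : Int), q))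
          cs (pvDistrib d cs.length) := by
  induction cs with
  | nil => intro acc d; simp [pvDistrib]
  | cons c cs ih =>
    intro acc d
    rw [List.foldl_cons]
    rw [show ((c :: cs).length : Int) - 1 = (cs.length : Int) from by push_cast; simp]
    rw [ih]
    have hce : pvCeilDiv d ((c :: cs).length : Int) =
        pvCeilDiv d (((cs.length + 1 : Nat)) : Int) := by norm_num
    rw [hce]
    simp only [pvDistrib, List.length_cons, List.zipWith_cons_cons, List.append_assoc,
      List.singleton_append]
    push_cast
    rfl

theorem pvLensBuild (n : Int) (m : Nat) (j : Int) (hj : j + m = n) :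
    ∀ (acc : List Int) (d : Int),
      ((PySem.List.pyRange j n 1).foldl
          (fun (st : List Int × Int) i =>
            (st.1 ++ [pvCeilDiv st.2 (n - i)], st.2 - pvCeilDiv st.2 (n - i))) (acc, d)).1 =
        acc ++ pvDistrib d m := by
  induction m generalizing j with
  | zero =>
    intro acc d
    rw [PySem.List.pyRange_one_eq_nil (by omega), List.foldl_nil]
    simp [pvDistrib]
  | succ m ih =>
    intro acc d
    rw [PySem.List.pyRange_one_cons (by omega), List.foldl_cons]
    have hnj : n - j = ((m + 1 : Nat) : Int) := by push_cast; omega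
    rw [hnj]
    rw [ih (j + 1) (by push_cast; omega)]
    simp [pvDistrib]

theorem pvMapGetD (l : List Int) : (List.range l.length).map (fun i => l.getD i 0) = l := by
  apply List.ext_getElem
  · simp
  · intro j hj1 hj2
    simp only [List.getElem_map, List.getElem_range]
    rw [List.getD_eq_getElem _ _ hj2]

theorem pvKd0 (key : List Char) (lens : List Int) (hlen : lens.length = key.length)
    (hnn : ∀ x ∈ lens, 0 ≤ x) :
    List.zipWith
        (fun c q => ((((PySem.List.index? (pvLetters key) c).getD 0 : Nat) : Int), q))
        key lens = pvKdAt key lens 0 0 := by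
  apply List.ext_getElem
  · simp [pvKdAt, hlen]
  · intro j hj1 hj2
    have hjk : j < key.length := by simpa [pvKdAt] using hj2
    have hjl : j < lens.length := by omega
    rw [List.getElem_zipWith]
    unfold pvKdAt
    rw [List.getElem_map, List.getElem_range]
    unfold pvRem pvRnk pvLen
    rw [List.getD_eq_getElem key '?' hjk, List.getD_eq_getElem lens 0 hjl]
    have hl0 : 0 ≤ lens[j] := hnn _ (List.getElem_mem hjl)
    rw [if_neg (by omega)]
    split_ifs with h1 h2
    · rw [Prod.mk.injEq]
      exact ⟨by push_cast; ring, by omega⟩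
    · rw [Prod.mk.injEq]
      exact ⟨by push_cast; ring, by omega⟩
    · rw [Prod.mk.injEq]
      exact ⟨by push_cast; ring, rfl⟩

theorem pvSumRem00 (key : List Char) (lens : List Int) (hlen : lens.length = key.length)
    (hnn : ∀ x ∈ lens, 0 ≤ x) : pvSumRem key lens 0 0 = lens.sum := by
  unfold pvSumRem
  have hcongr : ∀ i ∈ List.range key.length, pvRem key lens 0 0 i = lens.getD i 0 := by
    intro i hi
    have hik := List.mem_range.mp hi
    have hil : i < lens.length := by omega
    unfold pvRem pvLen
    rw [if_neg (by omega)]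
    have h0 : 0 ≤ lens.getD i 0 := by
      rw [List.getD_eq_getElem lens 0 hil]
      exact hnn _ (List.getElem_mem hil)
    split_ifs with h1 h2
    · omega
    · omega
    · rfl
  rw [List.map_congr_left hcongr, ← hlen, pvMapGetD]

-- ---- the read phase ----

theorem pvAInner_stuck (i : Int) (cols : List (List Char)) (out : List Char) :
    pvAInner i cols (out, 6) = (out, 6) := by
  cases cols with
  | nil => rfl
  | cons col rest => simp [pvAInner]

theorem pvARead_stuck (cols : List (List Char)) (rows : List Int) (out : List Char) :
    pvARead cols rows (out, 6) = (out, 6) := by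
  induction rows with
  | nil => rfl
  | cons row rest ih =>
    unfold pvARead at *
    rw [List.foldl_cons, pvAInner_stuck]
    exact ih

theorem pvAInner_cons (i : Int) (col : List Char) (rest : List (List Char))
    (acc : List Char) (count : Int) :
    pvAInner i (col :: rest) (acc, count) =
      if (count == 6) = true then (acc, count)
      else pvAInner i rest (acc ++ [PySem.List.pyGetD col i '?'], count + 1) := rfl

theorem pvBInner_cons (cols : List (List Char)) (row : Int) (i : Int) (rest : List Int)
    (out : List Char) :
    pvBInner cols row (i :: rest) out =
      if (PySem.List.len out == 6) = true then (out, true)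
      else pvBInner cols row rest
        (out ++ [PySem.List.pyGetD (PySem.List.pyGetD cols i []) row '?']) := rfl

theorem pvInner_corr (cols : List (List Char)) (row : Int) (m : Nat) :
    ∀ (k : Nat), cols.length - k = m → ∀ (out : List Char),
      pvAInner row (cols.drop k) (out, (out.length : Int)) =
        ((pvBInner cols row (PySem.List.pyRange k (cols.length : Int) 1) out).1,
          ((pvBInner cols row (PySem.List.pyRange k (cols.length : Int) 1) out).1.length : Int)) ∧
      ((pvBInner cols row (PySem.List.pyRange k (cols.length : Int) 1) out).2 = true →
        ((pvBInner cols row (PySem.List.pyRange k (cols.length : Int) 1) out).1.length : Int) = 6) := by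
  induction m with
  | zero =>
    intro k hk out
    have hk' : cols.length ≤ k := by omega
    rw [List.drop_eq_nil_of_le hk', PySem.List.pyRange_one_eq_nil (by exact_mod_cast hk')]
    simp [pvAInner, pvBInner]
  | succ m ih =>
    intro k hk out
    have hklt : k < cols.length := by omega
    rw [List.drop_eq_getElem_cons hklt]
    rw [PySem.List.pyRange_one_cons (by exact_mod_cast hklt)]
    rw [pvAInner_cons, pvBInner_cons]
    simp only [PySem.List.len_eq]
    by_cases hsix : ((out.length : Int) == 6) = true
    · rw [if_pos hsix, if_pos hsix]
      exact ⟨rfl, fun _ => by simpa using hsix⟩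
    · rw [if_neg hsix, if_neg hsix]
      have hBget : PySem.List.pyGetD cols ((k : Nat) : Int) [] = cols[k] := by
        rw [PySem.List.pyGetD_natCast, List.getD_eq_getElem _ _ hklt]
      rw [hBget]
      have hlen1 : ((out ++ [PySem.List.pyGetD cols[k] row '?']).length : Int) =
          (out.length : Int) + 1 := by simp
      have hcast : ((k : Nat) : Int) + 1 = (((k + 1 : Nat)) : Int) := by push_cast; ring
      rw [← hlen1, hcast]
      exact ih (k + 1) (by omega) (out ++ [PySem.List.pyGetD cols[k] row '?'])

theorem pvRead_corr (cols : List (List Char)) (rows : List Int) :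
    ∀ (out : List Char),
    (pvARead cols rows (out, (out.length : Int))).1 =
      pvBOuter cols (cols.length : Int) rows out := by
  induction rows with
  | nil => intro out; rfl
  | cons row rest ih =>
    intro out
    obtain ⟨hcorr, hflag⟩ :=
      pvInner_corr cols row (cols.length) 0 (by omega) out
    rw [List.drop_zero] at hcorr
    have hrange : PySem.List.pyRange ((0 : Nat) : Int) (cols.length : Int) 1 =
        PySem.List.pyRange 0 (cols.length : Int) 1 := by norm_num
    rw [hrange] at hcorr hflag
    have hA1 : pvARead cols (row :: rest) (out, (out.length : Int)) =
        pvARead cols rest (pvAInner row cols (out, (out.length : Int))) := rfl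
    have hB1 : pvBOuter cols (cols.length : Int) (row :: rest) out =
        if (pvBInner cols row (PySem.List.pyRange 0 (cols.length : Int) 1) out).2 = true
        then (pvBInner cols row (PySem.List.pyRange 0 (cols.length : Int) 1) out).1
        else pvBOuter cols (cols.length : Int) rest
          (pvBInner cols row (PySem.List.pyRange 0 (cols.length : Int) 1) out).1 := rfl
    rw [hA1, hcorr, hB1]
    by_cases hdone :
        (pvBInner cols row (PySem.List.pyRange 0 (cols.length : Int) 1) out).2 = true
    · rw [if_pos hdone]
      rw [hflag hdone]
      rw [pvARead_stuck]
    · rw [if_neg hdone]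
      exact ih (pvBInner cols row (PySem.List.pyRange 0 (cols.length : Int) 1) out).1

-- ---- lengths through the B fold (for the read phase) ----

theorem pvBRound_len (enc : List Char) (lens : List Int) (g : List Int) (r : Int)
    (st : List (List Char) × Int) : (pvBRound enc lens g r st).1.length = st.1.length := by
  induction g generalizing st with
  | nil => rfl
  | cons a g ih =>
    unfold pvBRound at *
    rw [List.foldl_cons]
    rw [ih]
    split <;> simp [PySem.List.length_pySetD]

theorem pvBRoundsFold_len (enc : List Char) (lens : List Int) (g : List Int)
    (l : List Int) : ∀ (st : List (List Char) × Int),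
    (l.foldl (fun st r => pvBRound enc lens g r st) st).1.length = st.1.length := by
  induction l with
  | nil => intro st; rfl
  | cons a l ih =>
    intro st
    rw [List.foldl_cons, ih]
    exact pvBRound_len enc lens g a st

theorem pvGroupStep_len (enc key : List Char) (lens : List Int)
    (st : List (List Char) × Int) (letter : Char) :
    (pvBGroupStep enc key lens st letter).1.length = st.1.length := by
  exact pvBRoundsFold_len enc lens (pvBGroup key letter) _ st

theorem pvBFold_len (enc key : List Char) (lens : List Int) (ls : List Char)
    (st : List (List Char) × Int) :
    (ls.foldl (pvBGroupStep enc key lens) st).1.length = st.1.length := by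
  induction ls generalizing st with
  | nil => rfl
  | cons a ls ih =>
    rw [List.foldl_cons, ih]
    exact pvGroupStep_len enc key lens st a

-- ---- assembling the equivalence ----

theorem magentacipherstep2_spec : Claim_equal_magentacipherstep2 := by
  intro S E hdom hpre
  unfold Spec_magentacipherstep2
  obtain ⟨hany, hlenE⟩ := hpre
  simp only [magentacipherstep2, magentacipherstep2_alt, PySem.List.len_eq]
  rw [pvKeyEq S]
  have hkeyne : S.toList.filter (fun c => !(PySem.Chars.isdigit c)) ≠ [] := by
    rw [List.any_eq_true] at hany
    obtain ⟨c, hc, hp⟩ := hany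
    intro hnil
    have : c ∈ S.toList.filter (fun c => !(PySem.Chars.isdigit c)) :=
      List.mem_filter.mpr ⟨hc, hp⟩
    simp [hnil] at this
  set key : List Char := S.toList.filter (fun c => !(PySem.Chars.isdigit c)) with hkey
  set lens : List Int := pvDistrib 6 key.length with hlens
  have hlenlen : lens.length = key.length := pvDistrib_length 6 key.length
  have hnn : ∀ x ∈ lens, 0 ≤ x := pvDistrib_nonneg 6 key.length (by norm_num)
  have hn1 : 1 ≤ key.length := List.length_pos_iff.mpr hkeyne
  have hsum : lens.sum = 6 := pvDistrib_sum 6 key.length (by norm_num) hn1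
  have hm1 : 0 < (pvLetters key).length :=
    List.length_pos_iff.mpr (pvLetters_ne_nil key hkeyne)
  have hmn : (pvLetters key).length ≤ key.length := pvLetters_len_le key
  rw [pvKdBuild (PySem.List.sorted (PySem.Set.ofList key) (fun c => c) false) key [] 6]
  rw [List.nil_append]
  rw [show PySem.List.sorted (PySem.Set.ofList key) (fun c => c) false = pvLetters key from rfl]
  rw [pvKd0 key lens hlenlen hnn]
  rw [pvLensBuild ((key.length : Nat) : Int) key.length 0 (by push_cast; ring) [] 6]
  rw [List.nil_append, ← hlens]
  have hsol0 : (pvKdAt key lens 0 0).map (fun _ => ([] : List Char)) =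
      List.replicate key.length ([] : List Char) := by
    rw [List.map_const']
    rw [pvKdAt_length]
  rw [hsol0]
  have hc10 : (0 : Int) = 6 - pvSumRem key lens 0 0 := by
    rw [pvSumRem00 key lens hlenlen hnn, hsum]
    norm_num
  have hfuel0 : (pvLetters key).length - 0 + (pvSumRem key lens 0 0).toNat + 1 ≤
      key.length + 13 := by
    rw [pvSumRem00 key lens hlenlen hnn, hsum]
    omega
  have hwhile := pvMain E.toList key lens hlenlen hnn (key.length + 13) 0 0
    (List.replicate key.length ([] : List Char)) 0 hm1 hc10 hfuel0
  rw [hwhile]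
  rw [← pvBFrom_peel E.toList key lens 0 hm1]
  rw [show pvBFrom E.toList key lens 0
      (List.replicate key.length ([] : List Char), 0) =
    (pvLetters key).foldl (pvBGroupStep E.toList key lens)
      (List.replicate key.length ([] : List Char), 0) from by
    unfold pvBFrom; rw [List.drop_zero]]
  set cols : List (List Char) :=
    ((pvLetters key).foldl (pvBGroupStep E.toList key lens)
      (List.replicate key.length ([] : List Char), 0)).1 with hcols
  have hcolslen : cols.length = key.length := by
    rw [hcols, pvBFold_len]
    simp
  have hread := pvRead_corr cols
    (PySem.List.pyRange 0 (pvCeilDiv 6 ((key.length : Nat) : Int)) 1) []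
  simp only [List.length_nil, Nat.cast_zero] at hread
  rw [hread, hcolslen]
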